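-- pv_equiv track=rewrite | github.com/validmind/developer-framework | scripts/convert_ts_to_pydantic.py | convert_ts_type_to_py_type
-- ===== SOURCE A (Python) =====
-- from typing import Dict
--
-- def convert_ts_type_to_py_type(ts_type: str) -> str:
--     type_mapping: Dict[str, str] = {
--         "string": "str",
--         "number": "float",
--         "boolean": "bool",
--         "any": "Any",
--         "{}": "dict",
--     }
--
--     py_type = type_mapping.get(ts_type, ts_type)
--
--     # Handle arrays
--     if ts_type.endswith("[]"):
--         inner_type = ts_type[:-2]
--         py_type = f"List[{convert_ts_type_to_py_type(inner_type)}]"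
--
--     return py_type
-- ===== SOURCE B (Python) =====
-- def convert_ts_type_to_py_type(ts_type: str) -> str:
--     type_mapping = {
--         "string": "str",
--         "number": "float",
--         "boolean": "bool",
--         "any": "Any",
--         "{}": "dict",
--     }
--
--     # Strip all trailing "[]" suffixes, counting the nesting depth.
--     base = ts_type
--     depth = 0
--     while base.endswith("[]"):
--         base = base[:-2]
--         depth += 1
--
--     # Map the base once, then wrap it in List[...] depth times.
--     py_type = type_mapping.get(base, base)
--     for _ in range(depth):
--         py_type = f"List[{py_type}]"
--     return py_type
-- ===== Notes on version B (the rewrite author's own statement) =====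
-- stated objective: alternative
-- what changed: Replaces A's recursion over nested array suffixes with a flat pass: a while-loop strips and counts all trailing bracket pairs, the base is mapped once via the dict, and a loop wraps the mapped base in the list type constructor depth times.
import Mathlib
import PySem

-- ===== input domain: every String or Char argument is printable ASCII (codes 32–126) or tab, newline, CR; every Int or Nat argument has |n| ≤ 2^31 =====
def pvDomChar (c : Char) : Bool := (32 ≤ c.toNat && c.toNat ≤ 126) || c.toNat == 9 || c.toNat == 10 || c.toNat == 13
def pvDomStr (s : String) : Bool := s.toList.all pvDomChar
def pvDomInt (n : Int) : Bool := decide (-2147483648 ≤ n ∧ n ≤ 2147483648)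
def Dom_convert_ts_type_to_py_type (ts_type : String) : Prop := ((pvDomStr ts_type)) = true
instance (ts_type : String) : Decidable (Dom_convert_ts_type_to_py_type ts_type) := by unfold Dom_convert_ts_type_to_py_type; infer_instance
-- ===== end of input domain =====

-- B replaces A's recursion over nested '[]' suffixes by one strip-and-count loop
-- followed by a single lookup and a wrap loop (objective: alternative decomposition).
-- Both ports work on List Char (per PySem convention) with a String wrapper.

-- ===== PORT A =====
-- the type_mapping dict, as an association list over code-point lists
def pvTypeMapping : PySem.Dict (List Char) (List Char) :=
  PySem.Dict.ofList [("string".toList, "str".toList), ("number".toList, "float".toList),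
   ("boolean".toList, "bool".toList), ("any".toList, "Any".toList),
   ("{}".toList, "dict".toList)]

-- A's recursion: py = mapping.get(t, t); if t.endswith("[]"): py = "List[" + rec(t[:-2]) + "]"
def pvConvA (cs : List Char) : List Char :=
  let py := PySem.Dict.getD pvTypeMapping cs cs
  if PySem.Chars.endswith cs ('[' :: [']']) then
    "List[".toList ++ pvConvA (PySem.Chars.slice cs none (some (-2))) ++ [']']
  else py
termination_by cs.length
decreasing_by
  simp [PySem.Chars.slice_eq_listSlice]
  rw [PySem.List.slice_to_neg_ofNat cs 2 (by omega)]
  have h2 : 2 ≤ cs.length := by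
    have := (PySem.Chars.endswith_iff (s := cs) (p := ('[' :: [']']))).mp (by assumption)
    have := this.length_le; simpa using this
  simp [List.length_take]; omega

def convert_ts_type_to_py_type (ts_type : String) : String :=
  String.ofList (pvConvA ts_type.toList)

-- ===== PORT B =====
-- strip all trailing "[]" pairs, counting the depth
def pvStrip (cs : List Char) (depth : Nat) : List Char × Nat :=
  if PySem.Chars.endswith cs ('[' :: [']']) then
    pvStrip (PySem.Chars.slice cs none (some (-2))) (depth + 1)
  else (cs, depth)
termination_by cs.length
decreasing_by
  simp [PySem.Chars.slice_eq_listSlice]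
  rw [PySem.List.slice_to_neg_ofNat cs 2 (by omega)]
  have h2 : 2 ≤ cs.length := by
    have := (PySem.Chars.endswith_iff (s := cs) (p := ('[' :: [']']))).mp (by assumption)
    have := this.length_le; simpa using this
  simp [List.length_take]; omega

-- the wrap loop: for _ in range(depth): py = "List[" + py + "]"
def pvWrap (n : Nat) (py : List Char) : List Char :=
  match n with
  | 0 => py
  | n + 1 => pvWrap n ("List[".toList ++ py ++ [']'])

def pvConvB (cs : List Char) : List Char :=
  let sd := pvStrip cs 0
  pvWrap sd.2 (PySem.Dict.getD pvTypeMapping sd.1 sd.1)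

def convert_ts_type_to_py_type_alt (ts_type : String) : String :=
  String.ofList (pvConvB ts_type.toList)

-- ===== PRECONDITION & SPEC =====
def Spec_convert_ts_type_to_py_type (ts_type : String) (out : String) : Prop := out = convert_ts_type_to_py_type_alt ts_type
instance (ts_type : String) (out : String) : Decidable (Spec_convert_ts_type_to_py_type ts_type out) := by unfold Spec_convert_ts_type_to_py_type; infer_instance

-- ===== CLAIM (what is proved, stated in full; the proofs are below) =====
def Claim_equal_convert_ts_type_to_py_type : Prop := ∀ (ts_type : String), Dom_convert_ts_type_to_py_type ts_type → Spec_convert_ts_type_to_py_type ts_type (convert_ts_type_to_py_type ts_type)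

-- ===== LEMMAS AND PROOFS =====

-- the wrap loop's foldl-style recursion peels as outermost-layer recursion
theorem pvWrap_succ (n : Nat) (py : List Char) :
    pvWrap (n + 1) py = "List[".toList ++ pvWrap n py ++ [']'] := by
  induction n generalizing py with
  | zero => rfl
  | succ n ih => rw [pvWrap, ih]; rfl

-- the strip loop's accumulator only shifts the returned depth
theorem pvStrip_depth (cs : List Char) (d : Nat) :
    pvStrip cs d = ((pvStrip cs 0).1, d + (pvStrip cs 0).2) := by
  induction cs using pvConvA.induct generalizing d with
  | case1 cs h ih =>
    rw [pvStrip, if_pos h, ih, ih]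
    conv_rhs => rw [pvStrip, if_pos h, ih]
    simp; omega
  | case2 cs h =>
    rw [pvStrip, if_neg h, pvStrip, if_neg h]; simp

theorem pvConv_eq (cs : List Char) : pvConvA cs = pvConvB cs := by
  induction cs using pvConvA.induct with
  | case1 cs h ih =>
    rw [pvConvA, pvConvB, pvStrip, if_pos h, pvStrip_depth]
    simp only [if_pos h, ih, pvConvB]
    rw [Nat.add_comm, pvWrap_succ]
  | case2 cs h =>
    rw [pvConvA, pvConvB, pvStrip, if_neg h]
    simp [if_neg h, pvWrap]

-- ===== VERDICT (by name: the statement is the Claim_ definition above) =====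
theorem convert_ts_type_to_py_type_spec : Claim_equal_convert_ts_type_to_py_type := by
  intro ts _
  unfold Spec_convert_ts_type_to_py_type convert_ts_type_to_py_type convert_ts_type_to_py_type_alt
  rw [pvConv_eq]
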